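-- pv_equiv track=rewrite | github.com/Lightmaker777/Python-logical-expressions-II | task_3.py | may_enroll
-- ===== SOURCE A (Python) =====
-- users = [
--     {
--         "name": "Holly",
--         "type": "Student",
--         "password": "hunter",
--         "modules": [
--             {
--                 "title": "Computer basics",
--                 "completed": True
--             },
--             {
--                 "title": "Python basics",
--                 "completed": False
--             }
--         ]
--     },
--     {
--         "name": "Peter",
--         "type": "Student",
--         "password": "pan",
--         "modules": [
--             {
--                 "title": "Computer basics",
--                 "completed": False
--             }
--         ]
--     },
--     {
--         "name": "Luke",
--         "type": "Student",
--         "password": "skywalker",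
--         "modules": [
--             {
--                 "title": "Computer basics",
--                 "completed": True
--             }
--         ]
--     },
--     {
--         "name": "Janis",
--         "type": "Teacher",
--         "password": "joplin"
--     }
-- ]
--
-- modules = [
--     {
--         "name": "Computer basics"
--     },
--     {
--         "name": "Python basics",
--         "requirement": "Computer basics"
--     },
--     {
--         "name": "Django",
--         "requirement": "Python basics"
--     }
-- ]
--
-- def may_enroll(username, password, modulename):
--     def is_anonymous():
--         for user in users:
--             if user["name"] == username and user["password"] == password:
--                 return False
--         return True
--
--     def has_no_requirement():
--         for module in modules:
--             if module["name"] == modulename and "requirement" not in module: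
--                 return True
--         return False
--
--     def meets_requirement():
--         for module in modules:
--             if module["name"] == modulename and "requirement" in module:
--                 requirement = module["requirement"]
--                 for user in users:
--                     if user["name"] == username and user["password"] == password:
--                         if "modules" in user:
--                             for user_module in user["modules"]:
--                                 if user_module["title"] == requirement and user_module.get("completed", False):
--                                     return True
--                 return False
--
--     if is_anonymous() and has_no_requirement():
--         return True
--     elif not is_anonymous() and (has_no_requirement() or meets_requirement()):
--         return True
--     else:
--         return False
-- ===== SOURCE B (Python) =====
-- users = [
--     {"name": "Holly", "type": "Student", "password": "hunter",
--      "modules": [{"title": "Computer basics", "completed": True},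
--                  {"title": "Python basics", "completed": False}]},
--     {"name": "Peter", "type": "Student", "password": "pan",
--      "modules": [{"title": "Computer basics", "completed": False}]},
--     {"name": "Luke", "type": "Student", "password": "skywalker",
--      "modules": [{"title": "Computer basics", "completed": True}]},
--     {"name": "Janis", "type": "Teacher", "password": "joplin"},
-- ]
--
-- modules = [
--     {"name": "Computer basics"},
--     {"name": "Python basics", "requirement": "Computer basics"},
--     {"name": "Django", "requirement": "Python basics"},
-- ]
--
-- def may_enroll(username, password, modulename):
--     module = next((m for m in modules if m["name"] == modulename), None)
--     if module is None:
--         return False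
--     if "requirement" not in module:
--         return True
--     user = next((u for u in users if u["name"] == username and u["password"] == password), None)
--     if user is None:
--         return False
--     return any(um["title"] == module["requirement"] and um.get("completed", False)
--                for um in user.get("modules", []))
-- ===== Notes on version B (the rewrite author's own statement) =====
-- stated objective: simpler
-- what changed: Replaces the three nested helper scans and the two-branch anonymous/non-anonymous boolean with two single next() lookups (first matching module, first matching user) followed by flat early returns.
import Mathlib
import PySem

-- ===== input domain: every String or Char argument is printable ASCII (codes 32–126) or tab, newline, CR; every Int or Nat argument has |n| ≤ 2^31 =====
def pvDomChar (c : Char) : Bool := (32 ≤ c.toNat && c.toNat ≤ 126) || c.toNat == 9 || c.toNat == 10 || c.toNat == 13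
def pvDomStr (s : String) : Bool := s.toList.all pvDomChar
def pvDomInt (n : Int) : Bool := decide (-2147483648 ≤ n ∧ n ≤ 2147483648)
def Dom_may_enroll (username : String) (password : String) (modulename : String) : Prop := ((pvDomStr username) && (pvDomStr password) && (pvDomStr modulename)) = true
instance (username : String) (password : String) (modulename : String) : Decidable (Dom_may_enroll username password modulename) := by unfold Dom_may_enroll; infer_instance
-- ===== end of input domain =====

-- B replaces A's three nested helper scans with two first-match lookups plus flat logic (objective: simpler).

-- The module-level data, shared by both ports:
-- a user is (name, password, optional modules-list of (title, completed)); a module is (name, optional requirement).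
def usersA : List (String × String × Option (List (String × Bool))) :=
  [("Holly", "hunter", some [("Computer basics", true), ("Python basics", false)]),
   ("Peter", "pan", some [("Computer basics", false)]),
   ("Luke", "skywalker", some [("Computer basics", true)]),
   ("Janis", "joplin", none)]

def modulesA : List (String × Option String) :=
  [("Computer basics", none),
   ("Python basics", some "Computer basics"),
   ("Django", some "Python basics")]

-- ===== PORT A =====
-- is_anonymous: loop over users returning False at the first name/password match, else True
def isAnonymousA (username password : String) : Bool :=
  !(usersA.any (fun x => x.1 == username && x.2.1 == password))

-- has_no_requirement: loop over modules returning True at the first name match without a requirement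
def hasNoRequirementA (modulename : String) : Bool :=
  modulesA.any (fun x => x.1 == modulename && x.2.isNone)

-- meets_requirement: first module whose name matches and has a requirement; then scan all users for
-- a matching one owning a completed module titled `req`.  Python falls off the outer loop returning
-- None when no such module exists; that None is only used for truthiness, so it is ported as false.
def meetsRequirementA (username password modulename : String) : Bool :=
  match modulesA.find? (fun x => x.1 == modulename && x.2.isSome) with
  | some (_, some req) =>
      usersA.any (fun us => us.1 == username && us.2.1 == password &&
        (match us.2.2 with
         | some ms => ms.any (fun um => um.1 == req && um.2)
         | none => false))
  | _ => false

def may_enroll (username : String) (password : String) (modulename : String) : Bool :=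
  if isAnonymousA username password && hasNoRequirementA modulename then true
  else if !(isAnonymousA username password)
          && (hasNoRequirementA modulename || meetsRequirementA username password modulename) then true
  else false

-- ===== PORT B =====
def may_enroll_alt (username : String) (password : String) (modulename : String) : Bool :=
  match modulesA.find? (fun x => x.1 == modulename) with
  | none => false
  | some (_, none) => true
  | some (_, some req) =>
      match usersA.find? (fun x => x.1 == username && x.2.1 == password) with
      | none => false
      | some us => (us.2.2.getD []).any (fun um => um.1 == req && um.2)

-- ===== PRECONDITION & SPEC =====
def Spec_may_enroll (username : String) (password : String) (modulename : String) (out : Bool) : Prop := out = may_enroll_alt username password modulename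
instance (username : String) (password : String) (modulename : String) (out : Bool) : Decidable (Spec_may_enroll username password modulename out) := by unfold Spec_may_enroll; infer_instance

-- ===== CLAIM (what is proved, stated in full; the proofs are below) =====
def Claim_equal_may_enroll : Prop := ∀ (username : String) (password : String) (modulename : String), Dom_may_enroll username password modulename → Spec_may_enroll username password modulename (may_enroll username password modulename)

-- ===== LEMMAS AND PROOFS =====

-- ===== VERDICT (by name: the statement is the Claim_ definition above) =====
-- each user's name/password pair either matches both components or the `&&` test is false
theorem pairF {x y a b : String} (h : ¬(x = a ∧ y = b)) : (x == a && y == b) = false := by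
  cases hx : x == a <;> cases hy : y == b <;> simp_all

theorem may_enroll_spec : Claim_equal_may_enroll := by
  intro u p m _
  unfold Spec_may_enroll
  by_cases hm1 : "Computer basics" = m
  · subst hm1
    cases hA : isAnonymousA u p <;>
      simp [may_enroll, may_enroll_alt, hasNoRequirementA, modulesA, hA, List.any]
  · have cm1 : ("Computer basics" == m) = false := beq_eq_false_iff_ne.mpr hm1
    by_cases hm2 : "Python basics" = m
    · subst hm2
      by_cases h1 : "Holly" = u ∧ "hunter" = p
      · obtain ⟨rfl, rfl⟩ := h1; decide
      · by_cases h2 : "Peter" = u ∧ "pan" = p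
        · obtain ⟨rfl, rfl⟩ := h2; decide
        · by_cases h3 : "Luke" = u ∧ "skywalker" = p
          · obtain ⟨rfl, rfl⟩ := h3; decide
          · by_cases h4 : "Janis" = u ∧ "joplin" = p
            · obtain ⟨rfl, rfl⟩ := h4; decide
            · simp [may_enroll, may_enroll_alt, isAnonymousA, hasNoRequirementA, meetsRequirementA,
                    usersA, modulesA, List.find?, List.any,
                    pairF h1, pairF h2, pairF h3, pairF h4]
    · have cm2 : ("Python basics" == m) = false := beq_eq_false_iff_ne.mpr hm2
      by_cases hm3 : "Django" = m
      · subst hm3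
        by_cases h1 : "Holly" = u ∧ "hunter" = p
        · obtain ⟨rfl, rfl⟩ := h1; decide
        · by_cases h2 : "Peter" = u ∧ "pan" = p
          · obtain ⟨rfl, rfl⟩ := h2; decide
          · by_cases h3 : "Luke" = u ∧ "skywalker" = p
            · obtain ⟨rfl, rfl⟩ := h3; decide
            · by_cases h4 : "Janis" = u ∧ "joplin" = p
              · obtain ⟨rfl, rfl⟩ := h4; decide
              · simp [may_enroll, may_enroll_alt, isAnonymousA, hasNoRequirementA, meetsRequirementA,
                      usersA, modulesA, List.find?, List.any,
                      pairF h1, pairF h2, pairF h3, pairF h4]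
      · have cm3 : ("Django" == m) = false := beq_eq_false_iff_ne.mpr hm3
        simp [may_enroll, may_enroll_alt, isAnonymousA, hasNoRequirementA, meetsRequirementA,
              usersA, modulesA, List.find?, List.any, cm1, cm2, cm3]
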